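-- pv_equiv track=rewrite | github.com/AndreyYung/oper_mod | branch_and_bound.py | compute_idle
-- ===== SOURCE A (Python) =====
-- def calculate_makespan(matrix, order):
--
--
--     n = len(order)
--     m = len(matrix[0])
--
--     C = [[0]*m for _ in range(n)]
--
--     for i in range(n):
--         job = order[i]
--
--         for j in range(m):
--
--             if i == 0 and j == 0:
--                 C[i][j] = matrix[job][j]
--
--             elif i == 0:
--                 C[i][j] = C[i][j-1] + matrix[job][j]
--
--             elif j == 0:
--                 C[i][j] = C[i-1][j] + matrix[job][j]
--
--             else:
--                 C[i][j] = max(C[i-1][j], C[i][j-1]) + matrix[job][j]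
--
--     return C[-1][-1], C
--
-- def compute_idle(matrix, order):
--
--     n = len(order)
--     m = len(matrix[0])
--
--     makespan, C = calculate_makespan(matrix, order)
--
--     idle = 0
--
--     for j in range(m):
--
--         prev_finish = 0
--
--         for i in range(n):
--
--             start = 0
--
--             if i > 0:
--                 start = max(start, C[i-1][j])
--
--             if j > 0:
--                 start = max(start, C[i][j-1] - matrix[order[i]][j])
--
--             idle += max(0, start - prev_finish)
--
--             prev_finish = start + matrix[order[i]][j]
--
--     return idle
-- ===== SOURCE B (Python) =====
-- def compute_idle(matrix, order):
--     # Fused single pass: column-by-column DP keeping only the previous column,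
--     # accumulating idle in the same loop (no n x m completion matrix, no second pass).
--     n = len(order)
--     m = len(matrix[0])
--     idle = 0
--     prev_col = []
--     for j in range(m):
--         cur_col = []
--         prev_finish = 0
--         for i in range(n):
--             p = matrix[order[i]][j]
--             if i == 0 and j == 0:
--                 c = p
--             elif i == 0:
--                 c = prev_col[0] + p
--             elif j == 0:
--                 c = cur_col[i-1] + p
--             else:
--                 c = max(cur_col[i-1], prev_col[i]) + p
--             start = 0
--             if i > 0:
--                 start = max(start, cur_col[i-1])
--             if j > 0:
--                 start = max(start, prev_col[i] - p)
--             idle += max(0, start - prev_finish)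
--             prev_finish = start + p
--             cur_col.append(c)
--         prev_col = cur_col
--     return idle
-- ===== Notes on version B (the rewrite author's own statement) =====
-- stated objective: alternative
-- what changed: Fused the makespan DP and the idle accumulation into one column-by-column pass that keeps only the previous column (O(n) extra memory), eliminating the full n×m completion matrix, the calculate_makespan helper and the second double loop.
-- outside the precondition, e.g. on compute_idle([[1, 2]], []): A raises IndexError, B returns 0; on compute_idle([[]], [0]): A raises IndexError, B returns 0
-- crash fix: On a nonempty matrix with an empty first row, or a nonempty matrix with an empty order, A raises IndexError (C[-1][-1] on an empty completion matrix) while B returns 0 (no idle time). — e.g. on compute_idle([[1, 2]], []): A raises IndexError, B returns 0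
import Mathlib
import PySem

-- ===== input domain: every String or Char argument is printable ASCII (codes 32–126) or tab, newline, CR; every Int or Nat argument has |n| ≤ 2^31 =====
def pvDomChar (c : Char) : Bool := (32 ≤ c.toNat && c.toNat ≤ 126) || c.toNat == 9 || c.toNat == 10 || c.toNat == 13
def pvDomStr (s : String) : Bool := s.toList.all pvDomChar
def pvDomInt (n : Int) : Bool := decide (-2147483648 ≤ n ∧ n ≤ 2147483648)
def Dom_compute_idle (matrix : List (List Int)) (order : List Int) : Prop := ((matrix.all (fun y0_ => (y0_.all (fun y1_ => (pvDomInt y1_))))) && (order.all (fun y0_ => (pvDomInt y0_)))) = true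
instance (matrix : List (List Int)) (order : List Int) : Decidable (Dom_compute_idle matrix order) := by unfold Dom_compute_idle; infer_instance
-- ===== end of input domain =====

-- B fuses the idle accumulation into a column-by-column DP that keeps only the
-- previous column (O(n) memory, one pass) instead of A's full n×m completion
-- matrix followed by a second double pass.

-- ===== PORT A =====
-- matrix[order[i]][j]  (row lookup with Python negative-index wrap; defaults only hit outside Pre_)
def pvMatE (matrix : List (List Int)) (order : List Int) (i j : Nat) : Int :=
  ((PySem.List.pyGet? matrix (order.getD i 0)).getD []).getD j 0

def pvG2 (C : List (List Int)) (i j : Nat) : Int := (C.getD i []).getD j 0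

def pvSet2 (C : List (List Int)) (i j : Nat) (v : Int) : List (List Int) :=
  C.set i ((C.getD i []).set j v)

-- the inner 'for j in range(m)' of calculate_makespan, for row i (job = order[i])
def pvRowA (matrix : List (List Int)) (job : Int) (m i : Nat) (C : List (List Int)) : List (List Int) :=
  (List.range m).foldl (fun C j =>
    let p := ((PySem.List.pyGet? matrix job).getD []).getD j 0
    let v := if i = 0 ∧ j = 0 then p
      else if i = 0 then pvG2 C i (j-1) + p
      else if j = 0 then pvG2 C (i-1) j + p
      else max (pvG2 C (i-1) j) (pvG2 C i (j-1)) + p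
    pvSet2 C i j v) C

def calculate_makespan (matrix : List (List Int)) (order : List Int) : Int × List (List Int) :=
  let n := order.length
  let m := (matrix.getD 0 []).length
  let C := (List.range n).foldl (fun C i => pvRowA matrix (order.getD i 0) m i C)
              (List.replicate n (List.replicate m (0 : Int)))
  ((PySem.List.pyGet? ((PySem.List.pyGet? C (-1)).getD []) (-1)).getD 0, C)

-- one step of A's idle double loop (state = (idle, prev_finish))
def pvStepAIdle (matrix : List (List Int)) (order : List Int) (C : List (List Int)) (j : Nat)
    (st : Int × Int) (i : Nat) : Int × Int :=
  let start : Int := 0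
  let start := if 0 < i then max start (pvG2 C (i-1) j) else start
  let p := pvMatE matrix order i j
  let start := if 0 < j then max start (pvG2 C i (j-1) - p) else start
  (st.1 + max 0 (start - st.2), start + p)

def compute_idle (matrix : List (List Int)) (order : List Int) : Int :=
  let n := order.length
  let m := (matrix.getD 0 []).length
  let C := (calculate_makespan matrix order).2
  (List.range m).foldl (fun idle j =>
    ((List.range n).foldl (pvStepAIdle matrix order C j) (idle, 0)).1) 0

-- ===== PORT B =====
-- one step of B's fused inner loop (state = (cur_col, idle, prev_finish))
def pvStepB (matrix : List (List Int)) (order : List Int) (j : Nat) (prevCol : List Int)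
    (s : List Int × Int × Int) (i : Nat) : List Int × Int × Int :=
  let p := pvMatE matrix order i j
  let c := if i = 0 ∧ j = 0 then p
    else if i = 0 then prevCol.getD 0 0 + p
    else if j = 0 then s.1.getD (i-1) 0 + p
    else max (s.1.getD (i-1) 0) (prevCol.getD i 0) + p
  let start : Int := 0
  let start := if 0 < i then max start (s.1.getD (i-1) 0) else start
  let start := if 0 < j then max start (prevCol.getD i 0 - p) else start
  (s.1 ++ [c], s.2.1 + max 0 (start - s.2.2), start + p)

-- one column of B (state = (idle, prev_col))
def pvColB (matrix : List (List Int)) (order : List Int) (n : Nat)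
    (st : Int × List Int) (j : Nat) : Int × List Int :=
  let r := (List.range n).foldl (pvStepB matrix order j st.2) ([], st.1, 0)
  (r.2.1, r.1)

def compute_idle_alt (matrix : List (List Int)) (order : List Int) : Int :=
  ((List.range ((matrix.getD 0 []).length)).foldl (pvColB matrix order order.length) (0, [])).1

-- ===== PRECONDITION & SPEC =====
-- Pre_ excludes exactly the inputs where the Python A raises IndexError: empty matrix,
-- an empty first row (m = 0), an empty order (C[-1][-1] on an empty C), or a job index
-- in order that is out of range / whose row is shorter than m.
def Pre_compute_idle (matrix : List (List Int)) (order : List Int) : Prop :=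
  matrix ≠ [] ∧ matrix.getD 0 [] ≠ [] ∧ order ≠ [] ∧
  ∀ job ∈ order, (PySem.List.pyGet? matrix job).isSome = true ∧
    (matrix.getD 0 []).length ≤ ((PySem.List.pyGet? matrix job).getD []).length

instance (matrix : List (List Int)) (order : List Int) : Decidable (Pre_compute_idle matrix order) := by
  unfold Pre_compute_idle; infer_instance

def pvWitness_compute_idle : List (List Int) × List Int := ([[2, 1], [3, 4]], [1, 0])

-- On inputs with a nonempty matrix but an empty first row or an empty order, A raises
-- IndexError (C[-1][-1] on an empty row/matrix) while B naturally returns 0 (no idle time).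
def Raises_compute_idle (matrix : List (List Int)) (order : List Int) : Prop :=
  matrix ≠ [] ∧ (matrix.getD 0 [] = [] ∨ order = [])

instance (matrix : List (List Int)) (order : List Int) : Decidable (Raises_compute_idle matrix order) := by
  unfold Raises_compute_idle; infer_instance

def pvRaiseWitness_compute_idle : List (List Int) × List Int := ([[1, 2]], [])

def pvRaiseWitnessOut_compute_idle : Int := 0

def Spec_compute_idle (matrix : List (List Int)) (order : List Int) (out : Int) : Prop := out = compute_idle_alt matrix order
instance (matrix : List (List Int)) (order : List Int) (out : Int) : Decidable (Spec_compute_idle matrix order out) := by unfold Spec_compute_idle; infer_instance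

-- ===== CLAIM (what is proved, stated in full; the proofs are below) =====
def Claim_equal_compute_idle : Prop := ∀ (matrix : List (List Int)) (order : List Int), Dom_compute_idle matrix order → Pre_compute_idle matrix order → Spec_compute_idle matrix order (compute_idle matrix order)

def Claim_raises_compute_idle : Prop := (∀ (matrix : List (List Int)) (order : List Int), Dom_compute_idle matrix order → Raises_compute_idle matrix order → ¬ Pre_compute_idle matrix order) ∧ (Dom_compute_idle (pvRaiseWitness_compute_idle.1) (pvRaiseWitness_compute_idle.2) ∧ Raises_compute_idle (pvRaiseWitness_compute_idle.1) (pvRaiseWitness_compute_idle.2) ∧ compute_idle_alt (pvRaiseWitness_compute_idle.1) (pvRaiseWitness_compute_idle.2) = pvRaiseWitnessOut_compute_idle)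

-- ===== LEMMAS AND PROOFS =====

-- the completion-time recurrence both programs compute
def Cf (matrix : List (List Int)) (order : List Int) : Nat → Nat → Int
  | i, j =>
    let p := pvMatE matrix order i j
    if i = 0 ∧ j = 0 then p
    else if _hi : i = 0 then Cf matrix order 0 (j-1) + p
    else if _hj : j = 0 then Cf matrix order (i-1) 0 + p
    else max (Cf matrix order (i-1) j) (Cf matrix order i (j-1)) + p
termination_by i j => i + j
decreasing_by all_goals omega

lemma Cf_00 (matrix : List (List Int)) (order : List Int) :
    Cf matrix order 0 0 = pvMatE matrix order 0 0 := by
  rw [Cf]; simp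

lemma Cf_0s (matrix : List (List Int)) (order : List Int) (j : Nat) :
    Cf matrix order 0 (j+1) = Cf matrix order 0 j + pvMatE matrix order 0 (j+1) := by
  rw [Cf]; simp

lemma Cf_s0 (matrix : List (List Int)) (order : List Int) (i : Nat) :
    Cf matrix order (i+1) 0 = Cf matrix order i 0 + pvMatE matrix order (i+1) 0 := by
  rw [Cf]; simp

lemma Cf_ss (matrix : List (List Int)) (order : List Int) (i j : Nat) :
    Cf matrix order (i+1) (j+1) =
      max (Cf matrix order i (j+1)) (Cf matrix order (i+1) j) + pvMatE matrix order (i+1) (j+1) := by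
  rw [Cf]; simp

-- the common reference step for the idle accumulation (state = (idle, prev_finish))
def refStep (matrix : List (List Int)) (order : List Int) (j : Nat) (st : Int × Int) (i : Nat) : Int × Int :=
  let start : Int := if 0 < i then max 0 (Cf matrix order (i-1) j) else 0
  let p := pvMatE matrix order i j
  let start := if 0 < j then max start (Cf matrix order i (j-1) - p) else start
  (st.1 + max 0 (start - st.2), start + p)

def refIdle (matrix : List (List Int)) (order : List Int) (n m : Nat) : Int :=
  (List.range m).foldl (fun idle j =>
    ((List.range n).foldl (refStep matrix order j) (idle, 0)).1) 0

lemma foldl_congr_mem' {α β : Type} (l : List β) (f g : α → β → α) (a : α)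
    (h : ∀ acc, ∀ x ∈ l, f acc x = g acc x) : l.foldl f a = l.foldl g a := by
  induction l generalizing a with
  | nil => rfl
  | cons x xs ih =>
    simp only [List.foldl_cons]
    rw [h a x (by simp)]
    exact ih _ (fun acc y hy => h acc y (by simp [hy]))

-- ---- small getD lemmas ----
lemma getD_set_ne {α : Type} (l : List α) (i r : Nat) (a d : α) (h : r ≠ i) :
    (l.set i a).getD r d = l.getD r d := by
  simp [List.getD_eq_getElem?_getD, List.getElem?_set_ne (Ne.symm h)]

lemma getD_set_self {α : Type} (l : List α) (i : Nat) (a d : α) (h : i < l.length) :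
    (l.set i a).getD i d = a := by
  simp [List.getD_eq_getElem?_getD, h]

lemma getD_map_range (f : Nat → Int) (t r : Nat) (h : r < t) (d : Int) :
    ((List.range t).map f).getD r d = f r := by
  simp [List.getD_eq_getElem?_getD, h]

-- ---- pvSet2 / pvG2 ----
def Shape (C : List (List Int)) (n m : Nat) : Prop :=
  C.length = n ∧ ∀ r, r < n → (C.getD r []).length = m

lemma shape_pvSet2 {C : List (List Int)} {n m : Nat} (h : Shape C n m) (i j : Nat) (v : Int) :
    Shape (pvSet2 C i j v) n m := by
  obtain ⟨h1, h2⟩ := h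
  refine ⟨by simp [pvSet2, h1], fun r hr => ?_⟩
  by_cases hri : r = i
  · subst hri
    by_cases hl : r < C.length
    · rw [pvSet2, getD_set_self _ _ _ _ hl, List.length_set]; exact h2 r hr
    · rw [pvSet2, List.set_eq_of_length_le (by omega)]; exact h2 r hr
  · rw [pvSet2, getD_set_ne _ _ _ _ _ hri]; exact h2 r hr

lemma pvG2_set_ne_row {C : List (List Int)} {i r : Nat} (j c : Nat) (v : Int) (h : r ≠ i) :
    pvG2 (pvSet2 C i j v) r c = pvG2 C r c := by
  rw [pvG2, pvSet2, getD_set_ne _ _ _ _ _ h, pvG2]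

lemma pvG2_set_ne_col {C : List (List Int)} (i : Nat) {j c : Nat} (v : Int) (h : c ≠ j) :
    pvG2 (pvSet2 C i j v) i c = pvG2 C i c := by
  by_cases hl : i < C.length
  · rw [pvG2, pvSet2, getD_set_self _ _ _ _ hl, getD_set_ne _ _ _ _ _ h, pvG2]
  · rw [pvSet2, List.set_eq_of_length_le (by omega)]

lemma pvG2_set_self {C : List (List Int)} {i j : Nat} (v : Int)
    (hl : i < C.length) (hj : j < (C.getD i []).length) :
    pvG2 (pvSet2 C i j v) i j = v := by
  rw [pvG2, pvSet2, getD_set_self _ _ _ _ hl, getD_set_self _ _ _ _ hj]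

-- ---- A side: the built matrix computes Cf ----
lemma pvRowA_spec (matrix : List (List Int)) (order : List Int) (n m i : Nat)
    (C : List (List Int)) (hC : Shape C n m) (hi : i < n)
    (hprev : ∀ r, r < i → ∀ c, c < m → pvG2 C r c = Cf matrix order r c) :
    ∀ t, t ≤ m →
      Shape ((List.range t).foldl (fun C j =>
          let p := ((PySem.List.pyGet? matrix (order.getD i 0)).getD []).getD j 0
          let v := if i = 0 ∧ j = 0 then p
            else if i = 0 then pvG2 C i (j-1) + p
            else if j = 0 then pvG2 C (i-1) j + p
            else max (pvG2 C (i-1) j) (pvG2 C i (j-1)) + p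
          pvSet2 C i j v) C) n m ∧
      (∀ r, r < n → r ≠ i → ∀ c, pvG2 ((List.range t).foldl (fun C j =>
          let p := ((PySem.List.pyGet? matrix (order.getD i 0)).getD []).getD j 0
          let v := if i = 0 ∧ j = 0 then p
            else if i = 0 then pvG2 C i (j-1) + p
            else if j = 0 then pvG2 C (i-1) j + p
            else max (pvG2 C (i-1) j) (pvG2 C i (j-1)) + p
          pvSet2 C i j v) C) r c = pvG2 C r c) ∧
      (∀ c, c < t → pvG2 ((List.range t).foldl (fun C j =>
          let p := ((PySem.List.pyGet? matrix (order.getD i 0)).getD []).getD j 0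
          let v := if i = 0 ∧ j = 0 then p
            else if i = 0 then pvG2 C i (j-1) + p
            else if j = 0 then pvG2 C (i-1) j + p
            else max (pvG2 C (i-1) j) (pvG2 C i (j-1)) + p
          pvSet2 C i j v) C) i c = Cf matrix order i c) := by
  intro t
  induction t with
  | zero => exact fun _ => ⟨hC, fun _ _ _ _ => rfl, fun c hc => absurd hc (by omega)⟩
  | succ t ih =>
    intro ht
    obtain ⟨sh, hother, hrow⟩ := ih (by omega)
    set F := (List.range t).foldl (fun C j =>
          let p := ((PySem.List.pyGet? matrix (order.getD i 0)).getD []).getD j 0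
          let v := if i = 0 ∧ j = 0 then p
            else if i = 0 then pvG2 C i (j-1) + p
            else if j = 0 then pvG2 C (i-1) j + p
            else max (pvG2 C (i-1) j) (pvG2 C i (j-1)) + p
          pvSet2 C i j v) C with hF
    rw [List.range_succ, List.foldl_append, List.foldl_cons, List.foldl_nil, ← hF]
    -- the value written at (i, t) is Cf i t
    have hp : ((PySem.List.pyGet? matrix (order.getD i 0)).getD []).getD t 0
        = pvMatE matrix order i t := rfl
    have hval : (if i = 0 ∧ t = 0 then ((PySem.List.pyGet? matrix (order.getD i 0)).getD []).getD t 0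
            else if i = 0 then pvG2 F i (t-1) + ((PySem.List.pyGet? matrix (order.getD i 0)).getD []).getD t 0
            else if t = 0 then pvG2 F (i-1) t + ((PySem.List.pyGet? matrix (order.getD i 0)).getD []).getD t 0
            else max (pvG2 F (i-1) t) (pvG2 F i (t-1)) + ((PySem.List.pyGet? matrix (order.getD i 0)).getD []).getD t 0)
          = Cf matrix order i t := by
      rw [hp]
      match i, t with
      | 0, 0 => simp [Cf_00]
      | 0, t'+1 =>
        have h := hrow t' (by omega)
        simp [Cf_0s, h]
      | i'+1, 0 =>
        have h1 := hother i' (by omega) (by omega) 0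
        have h2 := hprev i' (by omega) 0 (by omega)
        simp [Cf_s0, h1, h2]
      | i'+1, t'+1 =>
        have h1 := hother i' (by omega) (by omega) (t'+1)
        have h2 := hprev i' (by omega) (t'+1) (by omega)
        have h3 := hrow t' (by omega)
        simp [Cf_ss, h1, h2, h3]
    refine ⟨shape_pvSet2 sh i t _, ?_, ?_⟩
    · intro r hr hri c
      rw [pvG2_set_ne_row _ _ _ hri, hother r hr hri c]
    · intro c hc
      by_cases hct : c = t
      · subst hct
        rw [pvG2_set_self _ (by rw [sh.1]; exact hi) (by rw [sh.2 i hi]; omega), hval]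
      · rw [pvG2_set_ne_col _ _ hct, hrow c (by omega)]

lemma buildA_spec (matrix : List (List Int)) (order : List Int) (n m : Nat) :
    ∀ k, k ≤ n →
      Shape ((List.range k).foldl (fun C i => pvRowA matrix (order.getD i 0) m i C)
        (List.replicate n (List.replicate m (0 : Int)))) n m ∧
      (∀ r, r < k → ∀ c, c < m →
        pvG2 ((List.range k).foldl (fun C i => pvRowA matrix (order.getD i 0) m i C)
          (List.replicate n (List.replicate m (0 : Int)))) r c = Cf matrix order r c) := by
  intro k
  induction k with
  | zero =>
    intro _
    refine ⟨⟨by simp, fun r hr => ?_⟩, fun r hr => absurd hr (by omega)⟩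
    rw [List.getD_eq_getElem?_getD]
    simp [hr]
  | succ k ih =>
    intro hk
    obtain ⟨sh, hcorr⟩ := ih (by omega)
    rw [List.range_succ, List.foldl_append, List.foldl_cons, List.foldl_nil]
    have := pvRowA_spec matrix order n m k _ sh (by omega) hcorr m (le_refl m)
    rw [pvRowA]
    refine ⟨this.1, ?_⟩
    intro r hr c hc
    by_cases hrk : r = k
    · subst hrk; exact this.2.2 c hc
    · rw [this.2.1 r (by omega) hrk c, hcorr r (by omega) c hc]

-- ---- A's idle pass equals refIdle ----
lemma A_ref (matrix : List (List Int)) (order : List Int) :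
    compute_idle matrix order = refIdle matrix order order.length (matrix.getD 0 []).length := by
  rw [compute_idle, refIdle]
  set n := order.length with hn
  set m := (matrix.getD 0 []).length with hm
  obtain ⟨sh, hcorr⟩ := buildA_spec matrix order n m n (le_refl n)
  have hC : (calculate_makespan matrix order).2
      = (List.range n).foldl (fun C i => pvRowA matrix (order.getD i 0) m i C)
          (List.replicate n (List.replicate m (0 : Int))) := rfl
  apply foldl_congr_mem'
  intro idle j hj
  have hjm : j < m := by
    rw [List.mem_range] at hj; exact hj
  congr 1
  apply foldl_congr_mem'
  intro st i hi
  have hin : i < n := by rw [List.mem_range] at hi; exact hi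
  rw [pvStepAIdle, refStep, hC]
  by_cases h1 : 0 < i
  · rw [if_pos h1, if_pos h1, hcorr (i-1) (by omega) j hjm]
    by_cases h2 : 0 < j
    · rw [if_pos h2, if_pos h2, hcorr i (by omega) (j-1) (by omega)]
    · rw [if_neg h2, if_neg h2]
  · rw [if_neg h1, if_neg h1]
    by_cases h2 : 0 < j
    · rw [if_pos h2, if_pos h2, hcorr i (by omega) (j-1) (by omega)]
    · rw [if_neg h2, if_neg h2]

-- ---- B equals refIdle ----
lemma B_inner (matrix : List (List Int)) (order : List Int) (nb j : Nat) (prevCol : List Int)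
    (hprev : 0 < j → prevCol = (List.range nb).map (fun i => Cf matrix order i (j-1))) :
    ∀ t, t ≤ nb → ∀ idle0 : Int,
      (List.range t).foldl (pvStepB matrix order j prevCol) ([], idle0, 0)
        = ((List.range t).map (fun i => Cf matrix order i j),
           (List.range t).foldl (refStep matrix order j) (idle0, 0)) := by
  intro t
  induction t with
  | zero => intro _ idle0; rfl
  | succ t ih =>
    intro ht idle0
    rw [List.range_succ, List.foldl_append, List.foldl_cons, List.foldl_nil,
      List.foldl_append, List.foldl_cons, List.foldl_nil, ih (by omega) idle0]
    have hleft : ∀ r, r < nb → 0 < j → prevCol.getD r 0 = Cf matrix order r (j-1) := by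
      intro r hr hjpos
      rw [hprev hjpos, getD_map_range _ _ _ hr]
    have habove : 0 < t → ((List.range t).map (fun i => Cf matrix order i j)).getD (t-1) 0
        = Cf matrix order (t-1) j := fun h => getD_map_range _ _ _ (by omega) _
    have hc : (if t = 0 ∧ j = 0 then pvMatE matrix order t j
        else if t = 0 then prevCol.getD 0 0 + pvMatE matrix order t j
        else if j = 0 then ((List.range t).map (fun i => Cf matrix order i j)).getD (t-1) 0 + pvMatE matrix order t j
        else max (((List.range t).map (fun i => Cf matrix order i j)).getD (t-1) 0) (prevCol.getD t 0) + pvMatE matrix order t j)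
        = Cf matrix order t j := by
      match t, j with
      | 0, 0 => simp [Cf_00]
      | 0, j'+1 =>
        have h := hleft 0 (by omega) (by omega)
        rw [h, Cf_0s]
        simp
      | t'+1, 0 =>
        have h := habove (by omega)
        rw [h, Cf_s0]
        simp
      | t'+1, j'+1 =>
        have ha := habove (by omega)
        have hl2 := hleft (t'+1) (by omega) (by omega)
        rw [ha, hl2, Cf_ss]
        simp
    have hA : ((List.range t).map (fun i => Cf matrix order i j)) ++ [Cf matrix order t j]
        = (List.range t ++ [t]).map (fun i => Cf matrix order i j) := by
      rw [List.map_append]; rfl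
    simp only [pvStepB, refStep]
    rw [hc, hA]
    by_cases h1 : 0 < t <;> by_cases h2 : 0 < j
    · rw [habove h1, hleft t (by omega) h2]
    · rw [habove h1]; simp only [if_neg h2]
    · simp only [if_neg h1]; rw [hleft t (by omega) h2]
    · simp only [if_neg h1, if_neg h2]

lemma B_outer (matrix : List (List Int)) (order : List Int) (nb : Nat) :
    ∀ t, (List.range t).foldl (pvColB matrix order nb) (0, [])
      = ((List.range t).foldl (fun idle j => ((List.range nb).foldl (refStep matrix order j) (idle, 0)).1) 0,
         if t = 0 then ([] : List Int) else (List.range nb).map (fun i => Cf matrix order i (t-1))) := by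
  intro t
  induction t with
  | zero => rfl
  | succ t ih =>
    rw [List.range_succ, List.foldl_append, List.foldl_cons, List.foldl_nil, ih,
      List.foldl_append, List.foldl_cons, List.foldl_nil]
    have hinner := B_inner matrix order nb t
      (if t = 0 then ([] : List Int) else (List.range nb).map (fun i => Cf matrix order i (t-1)))
      (fun h => by rw [if_neg (by omega)]) nb (le_refl nb)
      ((List.range t).foldl (fun idle j => ((List.range nb).foldl (refStep matrix order j) (idle, 0)).1) 0)
    simp only [pvColB]
    rw [hinner]
    simp

lemma B_ref (matrix : List (List Int)) (order : List Int) :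
    compute_idle_alt matrix order = refIdle matrix order order.length (matrix.getD 0 []).length := by
  rw [compute_idle_alt, refIdle, B_outer]

theorem compute_idle_spec : Claim_equal_compute_idle := by
  intro matrix order _ _
  unfold Spec_compute_idle
  rw [A_ref, B_ref]


def compute_idle_raises : Claim_raises_compute_idle := by
  unfold Claim_raises_compute_idle
  constructor
  · intro matrix order _ hr hp
    rcases hr with ⟨_, h | h⟩
    · exact hp.2.1 h
    · exact hp.2.2.1 h
  · exact ⟨by decide, by decide, by decide⟩
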